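-- pv_equiv track=rewrite | github.com/factor-feerist/MTE | modules/text_editor.py | get_text_edits_list
-- ===== SOURCE A (Python) =====
-- def get_text_edits_list(diff, edit_mark):
--     result = []
--     index = 0
--     for symbol in diff:
--         if symbol[0] == edit_mark:
--             if len(result) > 0 and result[-1][0] + len(result[-1][1]) == index:
--                 sequence_index = result[-1][0]
--                 sequence_value = result[-1][1]
--                 result[-1] = (sequence_index, sequence_value + symbol[2])
--             else:
--                 result.append((index, symbol[2]))
--         index += 1 if symbol[0] == edit_mark or symbol[0] == ' ' else 0
--     return result
-- ===== SOURCE B (Python) =====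
-- def get_text_edits_list(diff, edit_mark):
--     # pass 1: assign a running index to each symbol, collecting raw (index, value) pairs for marked symbols
--     raw = []
--     index = 0
--     for symbol in diff:
--         if symbol[0] == edit_mark:
--             raw.append((index, symbol[2]))
--         if symbol[0] == edit_mark or symbol[0] == ' ':
--             index += 1
--     # pass 2: merge adjacent raw pairs into runs
--     result = []
--     for idx, val in raw:
--         if result and result[-1][0] + len(result[-1][1]) == idx:
--             start, prev = result[-1]
--             result[-1] = (start, prev + val)
--         else:
--             result.append((idx, val))
--     return result
-- ===== Notes on version B (the rewrite author's own statement) =====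
-- stated objective: alternative
-- what changed: Splits A's single interleaved loop into two passes: one pass assigns running indices and extracts raw (index, value) pairs for marked symbols, a second pass folds the raw pairs into merged runs.
import Mathlib
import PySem

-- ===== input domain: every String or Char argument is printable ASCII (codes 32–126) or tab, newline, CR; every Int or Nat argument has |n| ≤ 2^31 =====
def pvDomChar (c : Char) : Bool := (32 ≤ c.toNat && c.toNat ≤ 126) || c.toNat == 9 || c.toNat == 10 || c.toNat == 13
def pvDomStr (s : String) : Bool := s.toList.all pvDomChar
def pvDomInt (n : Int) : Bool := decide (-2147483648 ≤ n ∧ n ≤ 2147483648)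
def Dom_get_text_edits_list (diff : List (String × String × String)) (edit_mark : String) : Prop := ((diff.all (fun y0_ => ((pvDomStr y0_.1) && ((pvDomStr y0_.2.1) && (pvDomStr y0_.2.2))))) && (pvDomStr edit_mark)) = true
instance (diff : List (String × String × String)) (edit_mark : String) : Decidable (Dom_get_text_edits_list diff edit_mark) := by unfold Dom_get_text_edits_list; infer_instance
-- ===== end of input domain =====

-- B re-implements A as two passes (index assignment, then run merging) instead of one interleaved loop; return value only, no mutation observable.

-- ===== PORT A =====
-- the body of A's for-loop, acting on the state (result, index)
def pvAStep (edit_mark : String) (st : List (Int × String) × Int) (symbol : String × String × String) : List (Int × String) × Int :=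
  let result :=
    if symbol.1 == edit_mark then
      match st.1.getLast? with
      | some (si, sv) =>
        if si + PySem.Str.len sv == st.2 then st.1.dropLast ++ [(si, sv ++ symbol.2.2)]
        else st.1 ++ [(st.2, symbol.2.2)]
      | none => st.1 ++ [(st.2, symbol.2.2)]
    else st.1
  let index := st.2 + (if symbol.1 == edit_mark || symbol.1 == " " then 1 else 0)
  (result, index)

def get_text_edits_list (diff : List (String × String × String)) (edit_mark : String) : List (Int × String) :=
  (diff.foldl (pvAStep edit_mark) ([], 0)).1

-- ===== PORT B =====
-- pass 1: running index, collect (index, value) of marked symbols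
def pvBPass1 (edit_mark : String) (st : List (Int × String) × Int) (symbol : String × String × String) : List (Int × String) × Int :=
  ( if symbol.1 == edit_mark then st.1 ++ [(st.2, symbol.2.2)] else st.1,
    if symbol.1 == edit_mark || symbol.1 == " " then st.2 + 1 else st.2 )

-- pass 2: merge a raw pair into the run list
def pvBMerge (result : List (Int × String)) (p : Int × String) : List (Int × String) :=
  match result.getLast? with
  | some (si, sv) =>
    if si + PySem.Str.len sv == p.1 then result.dropLast ++ [(si, sv ++ p.2)]
    else result ++ [(p.1, p.2)]
  | none => result ++ [(p.1, p.2)]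

def get_text_edits_list_alt (diff : List (String × String × String)) (edit_mark : String) : List (Int × String) :=
  ((diff.foldl (pvBPass1 edit_mark) ([], 0)).1).foldl pvBMerge []

-- ===== PRECONDITION & SPEC =====
def Spec_get_text_edits_list (diff : List (String × String × String)) (edit_mark : String) (out : List (Int × String)) : Prop := out = get_text_edits_list_alt diff edit_mark
instance (diff : List (String × String × String)) (edit_mark : String) (out : List (Int × String)) : Decidable (Spec_get_text_edits_list diff edit_mark out) := by unfold Spec_get_text_edits_list; infer_instance

-- ===== CLAIM (what is proved, stated in full; the proofs are below) =====
def Claim_equal_get_text_edits_list : Prop := ∀ (diff : List (String × String × String)) (edit_mark : String), Dom_get_text_edits_list diff edit_mark → Spec_get_text_edits_list diff edit_mark (get_text_edits_list diff edit_mark)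

-- ===== LEMMAS AND PROOFS =====

-- pass 1 builds its raw list by appending: the accumulated prefix factors out
theorem pvBPass1_acc (edit_mark : String) (diff : List (String × String × String))
    (raw : List (Int × String)) (i : Int) :
    (diff.foldl (pvBPass1 edit_mark) (raw, i)).1
      = raw ++ (diff.foldl (pvBPass1 edit_mark) ([], i)).1 := by
  induction diff generalizing raw i with
  | nil => simp
  | cons s rest ih =>
    simp only [List.foldl_cons, pvBPass1]
    by_cases hm : (s.1 == edit_mark) = true
    · simp only [hm, if_pos]
      rw [ih (raw ++ [(i, s.2.2)]), ih ([] ++ [(i, s.2.2)])]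
      simp
    · simp only [hm, Bool.false_eq_true, if_false]
      rw [ih raw]

-- the key invariant: A's loop from any state equals folding B's merge over B's raw pairs
theorem pvA_eq_merge_pass1 (edit_mark : String) (diff : List (String × String × String))
    (result : List (Int × String)) (i : Int) :
    (diff.foldl (pvAStep edit_mark) (result, i)).1
      = ((diff.foldl (pvBPass1 edit_mark) ([], i)).1).foldl pvBMerge result := by
  induction diff generalizing result i with
  | nil => simp
  | cons s rest ih =>
    simp only [List.foldl_cons]
    by_cases hm : (s.1 == edit_mark) = true
    · have hstep : pvAStep edit_mark (result, i) s = (pvBMerge result (i, s.2.2), i + 1) := by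
        simp [pvAStep, pvBMerge, hm]
      rw [hstep, ih]
      have : (pvBPass1 edit_mark ([], i) s) = ([(i, s.2.2)], i + 1) := by
        simp [pvBPass1, hm]
      rw [this, pvBPass1_acc edit_mark rest [(i, s.2.2)] (i+1), List.foldl_append]
      simp
    · by_cases hsp : (s.1 == " ") = true
      · have hstep : pvAStep edit_mark (result, i) s = (result, i + 1) := by
          simp [pvAStep, hm, hsp]
        have hstep' : (pvBPass1 edit_mark ([], i) s) = ([], i + 1) := by
          simp [pvBPass1, hm, hsp]
        rw [hstep, hstep', ih]
      · have hstep : pvAStep edit_mark (result, i) s = (result, i) := by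
          simp [pvAStep, hm, hsp]
        have hstep' : (pvBPass1 edit_mark ([], i) s) = ([], i) := by
          simp [pvBPass1, hm, hsp]
        rw [hstep, hstep', ih]

-- ===== VERDICT (by name: the statement is the Claim_ definition above) =====
theorem get_text_edits_list_spec : Claim_equal_get_text_edits_list := by
  intro diff edit_mark _
  unfold Spec_get_text_edits_list get_text_edits_list get_text_edits_list_alt
  exact pvA_eq_merge_pass1 edit_mark diff [] 0
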